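-- pv_equiv track=rewrite | github.com/umutdenizsenerr/Python-Projects | Game Simulation with MPI/simulator.py | SameLineAttack_x
-- ===== SOURCE A (Python) =====
-- def SameLineAttack_x(Attacker):
--     Damages = [0] * len(Attacker)
--     for i in range(len(Attacker)):
--         if Attacker[i] == "+":
--             if i != 0:
--                 if Attacker[i - 1] == "o":
--                     Damages[i - 1] -= 2
--             if i != len(Attacker) - 1:
--                 if Attacker[i + 1] == "o":
--                     Damages[i + 1] -= 2
--     return Damages
-- ===== SOURCE B (Python) =====
-- def SameLineAttack_x(Attacker):
--     # Point-free formulation: align each cell with its neighbours by zipping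
--     # the list against padded shifted copies of itself; no index arithmetic,
--     # no in-place writes, boundaries handled by the "" padding.
--     left = [""] + Attacker[:-1]
--     right = Attacker[1:] + [""]
--     return [(-2 if l == "+" else 0) + (-2 if r == "+" else 0) if c == "o" else 0
--             for l, c, r in zip(left, Attacker, right)]
-- ===== Notes on version B (the rewrite author's own statement) =====
-- stated objective: alternative
-- what changed: Replaces A's imperative scatter loop (each '+' writing -2 into neighbouring cells of a preallocated array by index) with a purely functional three-way zip of the list against its padded shifted copies, summing per-cell neighbour contributions in a comprehension with no index arithmetic, bounds checks or mutation.
import Mathlib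
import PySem

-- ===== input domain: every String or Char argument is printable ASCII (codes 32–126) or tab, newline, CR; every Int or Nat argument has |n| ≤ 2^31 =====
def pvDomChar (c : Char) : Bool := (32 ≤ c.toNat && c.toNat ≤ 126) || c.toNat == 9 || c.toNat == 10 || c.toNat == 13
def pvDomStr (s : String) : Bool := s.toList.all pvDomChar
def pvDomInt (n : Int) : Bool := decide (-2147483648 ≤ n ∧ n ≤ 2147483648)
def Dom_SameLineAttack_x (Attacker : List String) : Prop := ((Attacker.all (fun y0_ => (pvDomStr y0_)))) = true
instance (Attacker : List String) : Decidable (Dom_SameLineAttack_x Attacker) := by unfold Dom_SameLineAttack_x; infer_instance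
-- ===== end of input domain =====

-- B replaces A's index-scatter loop with a three-way zip of the list against padded shifted copies of itself; objective: alternative decomposition, same cost.


-- ===== PORT A =====
-- A: scatter — each '+' writes -2 into adjacent 'o' cells of a preallocated damage list.
-- (port of A's two sequential inner if-statements, in order)
def pvLeft (Attacker : List String) (dam : List Int) (i : Nat) : List Int :=
  if i ≠ 0 then
    (if Attacker.getD (i - 1) "" = "o" then dam.set (i - 1) (dam.getD (i - 1) 0 - 2) else dam)
  else dam

def pvRight (Attacker : List String) (dam : List Int) (i : Nat) : List Int :=
  if i ≠ Attacker.length - 1 then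
    (if Attacker.getD (i + 1) "" = "o" then dam.set (i + 1) (dam.getD (i + 1) 0 - 2) else dam)
  else dam

def pvStepA (Attacker : List String) (dam : List Int) (i : Nat) : List Int :=
  if Attacker.getD i "" = "+" then pvRight Attacker (pvLeft Attacker dam i) i else dam

def SameLineAttack_x (Attacker : List String) : List Int :=
  (List.range Attacker.length).foldl (pvStepA Attacker) (List.replicate Attacker.length 0)

-- ===== PORT B =====
-- B: zip the list against padded shifted copies of itself (Source B's zip(left, Attacker, right))
def pvZip3 (as bs cs : List String) : List Int :=
  match as, bs, cs with
  | l :: as', c :: bs', r :: cs' =>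
      ((if c = "o" then (if l = "+" then (-2 : Int) else 0) + (if r = "+" then -2 else 0) else 0))
        :: pvZip3 as' bs' cs'
  | _, _, _ => []

def SameLineAttack_x_alt (Attacker : List String) : List Int :=
  pvZip3 ("" :: Attacker.dropLast) Attacker (Attacker.tail ++ [""])

-- ===== PRECONDITION & SPEC =====
def Spec_SameLineAttack_x (Attacker : List String) (out : List Int) : Prop := out = SameLineAttack_x_alt Attacker
instance (Attacker : List String) (out : List Int) : Decidable (Spec_SameLineAttack_x Attacker out) := by unfold Spec_SameLineAttack_x; infer_instance

-- ===== CLAIM (what is proved, stated in full; the proofs are below) =====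
def Claim_equal_SameLineAttack_x : Prop := ∀ (Attacker : List String), Dom_SameLineAttack_x Attacker → Spec_SameLineAttack_x Attacker (SameLineAttack_x Attacker)

-- ===== LEMMAS AND PROOFS =====

-- per-cell value both sides are shown to equal
def pvCellB (Attacker : List String) (j : Nat) : Int :=
  (if Attacker.getD j "" = "o" ∧ 0 < j ∧ Attacker.getD (j - 1) "" = "+" then -2 else 0)
  + (if Attacker.getD j "" = "o" ∧ j + 1 < Attacker.length ∧ Attacker.getD (j + 1) "" = "+" then -2 else 0)

-- contribution of loop iteration i of A to cell j
def pvC1 (Attacker : List String) (j i : Nat) : Int :=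
  if Attacker.getD i "" = "+" ∧ i ≠ 0 ∧ j = i - 1 ∧ Attacker.getD (i - 1) "" = "o" then -2 else 0

def pvC2 (Attacker : List String) (j i : Nat) : Int :=
  if Attacker.getD i "" = "+" ∧ i ≠ Attacker.length - 1 ∧ j = i + 1 ∧ Attacker.getD (i + 1) "" = "o" then -2 else 0

theorem pvGetD_set (l : List Int) (k j : Nat) (v : Int) :
    (l.set k v).getD j 0 = if j = k ∧ k < l.length then v else l.getD j 0 := by
  by_cases h1 : j = k
  · subst h1
    by_cases h2 : j < l.length
    · simp [List.getD_eq_getElem?_getD, h2]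
    · simp [List.getD_eq_getElem?_getD, h2]
  · rw [if_neg (fun h => h1 h.1)]
    simp only [List.getD_eq_getElem?_getD, List.getElem?_set]
    rw [if_neg (fun h => h1 h.symm)]

theorem pvLeft_length (Attacker : List String) (dam : List Int) (i : Nat) :
    (pvLeft Attacker dam i).length = dam.length := by
  unfold pvLeft; split_ifs <;> simp

theorem pvRight_length (Attacker : List String) (dam : List Int) (i : Nat) :
    (pvRight Attacker dam i).length = dam.length := by
  unfold pvRight; split_ifs <;> simp

theorem pvStepA_length (Attacker : List String) (dam : List Int) (i : Nat) :
    (pvStepA Attacker dam i).length = dam.length := by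
  unfold pvStepA; split_ifs <;> simp [pvRight_length, pvLeft_length]

theorem pvLeft_getD (Attacker : List String) (dam : List Int) (i j : Nat) :
    (pvLeft Attacker dam i).getD j 0 = dam.getD j 0
      + (if i ≠ 0 ∧ j = i - 1 ∧ i - 1 < dam.length ∧ Attacker.getD (i - 1) "" = "o" then -2 else 0) := by
  unfold pvLeft
  by_cases h1 : i ≠ 0
  · by_cases h2 : Attacker.getD (i - 1) "" = "o"
    · rw [if_pos h1, if_pos h2, pvGetD_set]
      by_cases hc : j = i - 1 ∧ i - 1 < dam.length
      · obtain ⟨hj, hlt⟩ := hc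
        subst hj
        rw [if_pos ⟨rfl, hlt⟩, if_pos ⟨h1, rfl, hlt, h2⟩]
        ring
      · rw [if_neg hc, if_neg (fun h => hc ⟨h.2.1, h.2.2.1⟩)]
        ring
    · rw [if_pos h1, if_neg h2, if_neg (fun h => h2 h.2.2.2)]
      ring
  · rw [if_neg h1, if_neg (fun h => h1 h.1)]
    ring

theorem pvRight_getD (Attacker : List String) (dam : List Int) (i j : Nat) :
    (pvRight Attacker dam i).getD j 0 = dam.getD j 0
      + (if i ≠ Attacker.length - 1 ∧ j = i + 1 ∧ i + 1 < dam.length ∧ Attacker.getD (i + 1) "" = "o" then -2 else 0) := by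
  unfold pvRight
  by_cases h1 : i ≠ Attacker.length - 1
  · by_cases h2 : Attacker.getD (i + 1) "" = "o"
    · rw [if_pos h1, if_pos h2, pvGetD_set]
      by_cases hc : j = i + 1 ∧ i + 1 < dam.length
      · obtain ⟨hj, hlt⟩ := hc
        subst hj
        rw [if_pos ⟨rfl, hlt⟩, if_pos ⟨h1, rfl, hlt, h2⟩]
        ring
      · rw [if_neg hc, if_neg (fun h => hc ⟨h.2.1, h.2.2.1⟩)]
        ring
    · rw [if_pos h1, if_neg h2, if_neg (fun h => h2 h.2.2.2)]
      ring
  · rw [if_neg h1, if_neg (fun h => h1 h.1)]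
    ring

theorem pvStepA_getD (Attacker : List String) (dam : List Int) (i j : Nat)
    (hd : dam.length = Attacker.length) (hi : i < Attacker.length) :
    (pvStepA Attacker dam i).getD j 0 = dam.getD j 0 + pvC1 Attacker j i + pvC2 Attacker j i := by
  unfold pvStepA pvC1 pvC2
  by_cases hp : Attacker.getD i "" = "+"
  · rw [if_pos hp, pvRight_getD, pvLeft_getD, pvLeft_length, hd]
    have e1 : (if i ≠ 0 ∧ j = i - 1 ∧ i - 1 < Attacker.length ∧ Attacker.getD (i - 1) "" = "o" then (-2 : Int) else 0)
        = (if Attacker.getD i "" = "+" ∧ i ≠ 0 ∧ j = i - 1 ∧ Attacker.getD (i - 1) "" = "o" then (-2 : Int) else 0) := by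
      refine if_congr ?_ rfl rfl
      constructor
      · rintro ⟨a, b, -, d⟩; exact ⟨hp, a, b, d⟩
      · rintro ⟨-, a, b, d⟩; exact ⟨a, b, by omega, d⟩
    have e2 : (if i ≠ Attacker.length - 1 ∧ j = i + 1 ∧ i + 1 < Attacker.length ∧ Attacker.getD (i + 1) "" = "o" then (-2 : Int) else 0)
        = (if Attacker.getD i "" = "+" ∧ i ≠ Attacker.length - 1 ∧ j = i + 1 ∧ Attacker.getD (i + 1) "" = "o" then (-2 : Int) else 0) := by
      refine if_congr ?_ rfl rfl
      constructor
      · rintro ⟨a, b, -, d⟩; exact ⟨hp, a, b, d⟩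
      · rintro ⟨-, a, b, d⟩; exact ⟨a, b, by omega, d⟩
    rw [e1, e2]
  · rw [if_neg hp, if_neg (fun h => hp h.1), if_neg (fun h => hp h.1)]
    ring

theorem pvFoldA_length (Attacker : List String) (l : List Nat) (dam : List Int) :
    (l.foldl (pvStepA Attacker) dam).length = dam.length := by
  induction l generalizing dam with
  | nil => rfl
  | cons a t ih => simp only [List.foldl_cons]; rw [ih, pvStepA_length]

theorem pvFoldA_getD (Attacker : List String) (l : List Nat) (dam : List Int) (j : Nat)
    (hd : dam.length = Attacker.length) (hl : ∀ i ∈ l, i < Attacker.length) :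
    (l.foldl (pvStepA Attacker) dam).getD j 0
      = dam.getD j 0 + (l.map (pvC1 Attacker j)).sum + (l.map (pvC2 Attacker j)).sum := by
  induction l generalizing dam with
  | nil => simp
  | cons a t ih =>
    simp only [List.foldl_cons, List.map_cons, List.sum_cons]
    rw [ih _ (by rw [pvStepA_length]; exact hd) (fun i hi => hl i (List.mem_cons_of_mem _ hi)),
        pvStepA_getD Attacker dam a j hd (hl a List.mem_cons_self)]
    ring

theorem pvSum_support (f : Nat → Int) (k n : Nat) (h : ∀ i, i ≠ k → f i = 0) :
    ((List.range n).map f).sum = if k < n then f k else 0 := by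
  induction n with
  | zero => simp
  | succ m ih =>
    rw [List.range_succ]
    simp only [List.map_append, List.sum_append, List.map_cons, List.map_nil, List.sum_cons,
      List.sum_nil, ih]
    by_cases hk : k = m
    · subst hk; simp
    · rw [h m (fun he => hk he.symm)]
      split_ifs <;> simp_all <;> omega

theorem pvC1_support (Attacker : List String) (j i : Nat) (h : i ≠ j + 1) :
    pvC1 Attacker j i = 0 := by
  unfold pvC1; split_ifs with hc
  · exfalso; omega
  · rfl

theorem pvC2_support (Attacker : List String) (j i : Nat) (h : i ≠ j - 1) :
    pvC2 Attacker j i = 0 := by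
  unfold pvC2; split_ifs with hc
  · exfalso; omega
  · rfl

theorem pvT1 (Attacker : List String) (j : Nat) :
    (if j + 1 < Attacker.length then pvC1 Attacker j (j + 1) else 0)
      = if Attacker.getD j "" = "o" ∧ j + 1 < Attacker.length ∧ Attacker.getD (j + 1) "" = "+" then -2 else 0 := by
  by_cases h1 : j + 1 < Attacker.length
  · rw [if_pos h1]
    unfold pvC1
    simp only [Nat.add_sub_cancel]
    refine if_congr ?_ rfl rfl
    constructor
    · rintro ⟨p, -, -, o⟩; exact ⟨o, h1, p⟩
    · rintro ⟨o, -, p⟩; exact ⟨p, by omega, by trivial, o⟩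
  · rw [if_neg h1, if_neg (fun h => h1 h.2.1)]

theorem pvT2 (Attacker : List String) (j : Nat) (hj : j < Attacker.length) :
    (if j - 1 < Attacker.length then pvC2 Attacker j (j - 1) else 0)
      = if Attacker.getD j "" = "o" ∧ 0 < j ∧ Attacker.getD (j - 1) "" = "+" then -2 else 0 := by
  rw [if_pos (by omega)]
  unfold pvC2
  by_cases h2 : 0 < j
  · have e : j - 1 + 1 = j := by omega
    simp only [e]
    refine if_congr ?_ rfl rfl
    constructor
    · rintro ⟨p, -, -, o⟩; exact ⟨o, h2, p⟩
    · rintro ⟨o, -, p⟩; exact ⟨p, by omega, by trivial, o⟩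
  · rw [if_neg (fun h => absurd h.2.2.1 (by omega)), if_neg (fun h => h2 h.2.1)]

theorem pvContrib_sum (Attacker : List String) (j : Nat) (hj : j < Attacker.length) :
    ((List.range Attacker.length).map (pvC1 Attacker j)).sum
      + ((List.range Attacker.length).map (pvC2 Attacker j)).sum
      = pvCellB Attacker j := by
  rw [pvSum_support _ (j + 1) _ (pvC1_support Attacker j),
      pvSum_support _ (j - 1) _ (pvC2_support Attacker j),
      pvT1, pvT2 Attacker j hj]
  unfold pvCellB
  ring

-- ===== B-side lemmas: pvZip3 evaluated pointwise =====
theorem pvZip3_length (as bs cs : List String) :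
    (pvZip3 as bs cs).length = min as.length (min bs.length cs.length) := by
  induction as generalizing bs cs with
  | nil => simp [pvZip3]
  | cons a as ih =>
    cases bs with
    | nil => simp [pvZip3]
    | cons b bs =>
      cases cs with
      | nil => simp [pvZip3]
      | cons c cs => simp [pvZip3, ih]

theorem pvZip3_getElem (as bs cs : List String) (j : Nat)
    (h : j < (pvZip3 as bs cs).length) (ha : j < as.length) (hb : j < bs.length) (hc : j < cs.length) :
    (pvZip3 as bs cs)[j] =
      (if bs[j] = "o" then (if as[j] = "+" then (-2 : Int) else 0) + (if cs[j] = "+" then -2 else 0) else 0) := by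
  induction as generalizing bs cs j with
  | nil => simp at ha
  | cons a as ih =>
    cases bs with
    | nil => simp at hb
    | cons b bs =>
      cases cs with
      | nil => simp at hc
      | cons c cs =>
        cases j with
        | zero => rfl
        | succ k =>
          simp only [pvZip3, List.getElem_cons_succ]
          exact ih bs cs k (by simpa [pvZip3] using h) (by simpa using ha)
            (by simpa using hb) (by simpa using hc)

theorem pvAlt_length (Attacker : List String) :
    (SameLineAttack_x_alt Attacker).length = Attacker.length := by
  unfold SameLineAttack_x_alt
  rw [pvZip3_length]
  cases Attacker with
  | nil => simp
  | cons a t => simp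

theorem pvAlt_getElem (Attacker : List String) (j : Nat) (h : j < (SameLineAttack_x_alt Attacker).length) :
    (SameLineAttack_x_alt Attacker)[j] = pvCellB Attacker j := by
  have hj : j < Attacker.length := by rw [pvAlt_length] at h; exact h
  have hL : j < ("" :: Attacker.dropLast).length := by
    simp [List.length_dropLast]; omega
  have hR : j < (Attacker.tail ++ [""]).length := by
    simp [List.length_tail]; omega
  unfold SameLineAttack_x_alt at h ⊢
  rw [pvZip3_getElem _ _ _ j h hL hj hR]
  have eC : Attacker[j] = Attacker.getD j "" := (List.getD_eq_getElem _ _ hj).symm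
  have eL : ("" :: Attacker.dropLast)[j]'hL
      = if 0 < j then Attacker.getD (j - 1) "" else "" := by
    cases j with
    | zero => simp
    | succ k =>
      have hk : k < Attacker.dropLast.length := by simpa using hL
      simp only [List.getElem_cons_succ, List.getElem_dropLast]
      rw [if_pos (Nat.succ_pos k)]
      simp only [Nat.add_sub_cancel]
      exact (List.getD_eq_getElem _ _ (by omega)).symm
  have eR : (Attacker.tail ++ [""])[j]'hR
      = if j + 1 < Attacker.length then Attacker.getD (j + 1) "" else "" := by
    by_cases hlt : j < Attacker.tail.length
    · rw [List.getElem_append_left hlt, if_pos (by simp [List.length_tail] at hlt; omega)]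
      rw [List.getElem_tail]
      exact (List.getD_eq_getElem _ _ (by simp [List.length_tail] at hlt; omega)).symm
    · rw [List.getElem_append_right (by omega)]
      rw [if_neg (by simp [List.length_tail] at hlt; omega)]
      simp
  rw [eC, eL, eR]
  unfold pvCellB
  by_cases hO : Attacker.getD j "" = "o"
  · rw [if_pos hO]
    congr 1
    · by_cases h0 : 0 < j
      · rw [if_pos h0]
        refine if_congr ?_ rfl rfl
        constructor
        · intro hp; exact ⟨hO, h0, hp⟩
        · rintro ⟨-, -, hp⟩; exact hp
      · rw [if_neg h0, if_neg (by simp), if_neg (fun h => h0 h.2.1)]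
    · by_cases h1 : j + 1 < Attacker.length
      · rw [if_pos h1]
        refine if_congr ?_ rfl rfl
        constructor
        · intro hp; exact ⟨hO, h1, hp⟩
        · rintro ⟨-, -, hp⟩; exact hp
      · rw [if_neg h1, if_neg (by simp), if_neg (fun h => h1 h.2.1)]
  · rw [if_neg hO, if_neg (fun h => hO h.1), if_neg (fun h => hO h.1)]
    norm_num

-- ===== VERDICT (by name: the statement is the Claim_ definition above) =====
theorem SameLineAttack_x_spec : Claim_equal_SameLineAttack_x := by
  intro Attacker _
  unfold Spec_SameLineAttack_x
  apply List.ext_getElem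
  · rw [pvAlt_length]
    unfold SameLineAttack_x
    simp [pvFoldA_length]
  · intro j h1 h2
    have hj : j < Attacker.length := by rw [pvAlt_length] at h2; exact h2
    rw [pvAlt_getElem Attacker j h2]
    unfold SameLineAttack_x at h1 ⊢
    have hg := pvFoldA_getD Attacker (List.range Attacker.length)
      (List.replicate Attacker.length 0) j (by simp) (by simp)
    rw [List.getD_eq_getElem _ _ h1] at hg
    have h0 : (List.replicate Attacker.length (0 : Int)).getD j 0 = 0 := by
      rw [List.getD_eq_getElem _ _ (by simpa using hj)]
      simp
    rw [h0, zero_add] at hg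
    rw [hg, pvContrib_sum Attacker j hj]
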